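/- GENERATED by mk_final_copies.py from the proof of the farm's unit `__asan_storeN_noabort` (farm:__asan_storeN_noabort.1: Proof.lean) as the
   re-elaboration sweep compiled it — do not edit. -/
import Asan.CheckWalk
import Vorbis.Spec.Units.asan_storeN_noabort

open X86 X86.User Asan Vorbis

set_option maxRecDepth 4000
set_option maxHeartbeats 4000000

namespace Vorbis.Spec.asan_storeN_noabort

/-- `rangeBadSpec` with a ghost fact `G` about the state at the callee's entry: the walker forgets everything but the memory of
that state once the call has returned, so the precondition records `G` (here: which registers, vector registers and MXCSR are
still those of the caller's entry) and the postcondition hands it back, next to `rangeBadSpec`'s own post. -/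
def rangeBadWith (G : State → Prop) : Spec where
  pre u := G u ∧ rangeBadSpec.pre u
  post u v := G u ∧ rangeBadSpec.post u v
  frame := 0
  writes _ := []

/-- The frame of `rangeBadWith`: none, as `rangeBadSpec`'s. -/
theorem rangeBadWith_frame (G : State → Prop) : (rangeBadWith G).frame = 0 := id rfl

/-- The windows of `rangeBadWith`: none, as `rangeBadSpec`'s. -/
theorem rangeBadWith_writes (G : State → Prop) (u : State) : (rangeBadWith G).writes u = [] := id rfl

/-- `range_bad` satisfies `rangeBadWith G` for every `G`: a weakening of its contract (`Calls.weaken`). -/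
theorem calls_rangeBadWith {Lay : Layout} {μ : Microarch} {I : State → Prop} {K : Conv} {entry : Word}
    (h : Calls Lay μ I K entry rangeBadSpec) (G : State → Prop) : Calls Lay μ I K entry (rangeBadWith G) := by
  refine h.weaken ?_ ?_ (Nat.le_refl _) ?_
  · intro u hp
    exact hp.2
  · intro u v hp hq
    exact ⟨hp.1, hq⟩
  · intro u _ w hw
    exact absurd hw List.not_mem_nil

/-- What the caller knows of the state `s` at `range_bad`'s entry, relative to its own entry state `u`: the general registers
but rbx rbp rsp, the vector registers and MXCSR are those of `u`. -/
def AsAtEntry (u s : State) : Prop :=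
  RegsKept [.rbx, .rbp, .rsp] u s ∧ s.zmm = u.zmm ∧ s.mxcsr = u.mxcsr

end Vorbis.Spec.asan_storeN_noabort

open Vorbis.Spec.asan_storeN_noabort

/-- `__asan_storeN_noabort(a, n)` satisfies its contract `checkNSpec`: `n = 0` returns at once; otherwise two pushes, `call range_bad`
(its contract, with the caller's knowledge of the entry state as a ghost: `rangeBadWith`), which returns 0 because the range is
accessible, so the path into `__asan_report` is infeasible and the other pops rbx rbp back and returns. -/
theorem Vorbis.Spec.Worked.asan_storeN_noabort_ok : Vorbis.Spec.asan_storeN_noabort.Statement := by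
  intro Lay hLay μ hμ u₀ hcode h_range_bad u ret he hpre
  v_entry he
  -- (a fact about the vector registers, so that the walk tracks them: the post says `v.zmm = u.zmm`)
  have hzmm : u.zmm = u.zmm := rfl
  -- the callee's contract, with what is known of the state at its entry as a ghost (the walker keeps only that state's memory)
  have hrb := calls_rangeBadWith h_range_bad (AsAtEntry u)
  clear h_range_bad
  -- 0x100b40 … 0x100b52, asan_rt.c:115–118: the test of `size`, the pushes, the call
  u_walk hcode [hμ.vendor] span [Vorbis.L.textLo, Vorbis.L.textHi] side (v_side)
  case call_room =>
    simp only [rangeBadWith_frame, Vorbis.conv_stackLo]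
    u_omega
  case call_inv => v_inv
  case pre_100b52 =>
    -- `range_bad`'s precondition `1 ≤ size`, and the ghost: what the walk knows of the registers here
    refine ⟨⟨w_kept, w_zmm, w_mxcsr⟩, ?_⟩
    show 1 ≤ (s_100b52.reg .rsi).toNat
    rw [w_kept.get .rsi (by decide)]
    omega
  · -- L.__asan_storeN_noabort.cut1 = 0x100b57, asan_rt.c:118: after the call. The walker's description of the returned state is
    -- rebuilt from the ghost and `range_bad`'s post: it clobbers rax rdx rdi only, keeps the memory, zmm and MXCSR.
    obtain ⟨⟨hk0, hz0, hx0⟩, hm, ⟨hk, hz, hx⟩, hle, hiff⟩ := w_post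
    have w_eq := Vorbis.conv_code_eqOn w_code
    rw [hk0.get .rdi (by decide), hk0.get .rsi (by decide)] at hiff
    have hk1 : RegsKept [.rbx, .rbp, .rsp, .rax, .rdx, .rdi] u s_100b52 := hk0.mono_all (by rfl)
    have hk2 : RegsKept [.rbx, .rbp, .rsp, .rax, .rdx, .rdi] s_100b52 s_100b52r := hk.mono_all (by rfl)
    replace w_kept := hk1.trans hk2
    have w_zmm : s_100b52r.zmm = u.zmm := hz.trans hz0
    have w_mxcsr : s_100b52r.mxcsr = u.mxcsr := hx.trans hx0
    have w_mem : s_100b52r.mem = s_100b52.mem := hm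
    rw [w_mem_100b52] at w_mem
    clear hk hk0 hk1 hk2 hz hz0 hx hx0 w_same
    -- the range is accessible in the memory `range_bad` looked at: the three stack stores did not touch the shadow
    have hne : (u.reg .rsi).toNat ≠ 0 := hbr_100b43
    have hacc : Accessible s_100b52.mem (u.reg .rdi).toNat (u.reg .rsi).toNat := by
      have hun : ShadowUntouched u.mem s_100b52.mem := by v_untouched
      exact (hpre.resolve_left hne).eqOn (by omega) hun
    have hrax : (s_100b52r.reg .rax).toNat = 0 := hiff.mpr hacc
    have hdf : s_100b52r.flags .df = false := (show X86.User.abiInv _ from w_inv).1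
    clear hiff hle
    u_walk hcode [hμ.vendor] span [Vorbis.L.textLo, Vorbis.L.textHi] side (v_side)
    · -- 0x100b6d, asan_rt.c:119: the path into `__asan_report` is infeasible, `range_bad` returned 0
      exfalso
      apply hbr_100b59
      rw [Asan.part32_toNat, hrax]
    · -- 0x100b61, asan_rt.c:121: the state after the `ret`
      refine ReachVia.done ?_
      v_returned
      -- the post: rbx and rbp were popped back, everything else outside rax rdx rdi rsp was kept throughout
      refine ⟨?_, w_zmm, w_mxcsr⟩
      show RegsKept [.rax, .rdx, .rdi, .rsp] u s_100b61
      u_saved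
  · -- 0x100b45, asan_rt.c:115: `size == 0`, the state after the `ret` (the fields of `Returned` by hand: the holes of a second
    -- `v_returned` in one proof would clash with the first's)
    refine ReachVia.done ⟨w_rip, w_rsp, ?_, ?_, Vorbis.conv_code_in w_eq, ?_, ?_⟩
    · u_saved
    · simp only [X86.User.Spec.footprint, vspec]
      u_same
    · v_inv
    · exact ⟨w_kept.mono_all (by rfl), w_zmm, w_mxcsr⟩
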